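-- pv_equiv track=rewrite | github.com/aidan-t-chang/legitcode | daily problems-2024/05.24-maxscoreformedbyletters.py | maxScoreWords
-- ===== SOURCE A (Python) =====
-- from collections import Counter
--
-- def maxScoreWords(words, letters, score):
--     def formable_word(w, lettercount):
--         word_count = Counter(w)
--         for c in word_count:
--             if word_count[c] > lettercount[c]: # does the count of that character ever exceed what is available?
--                 return False
--         return True # if condition never happens
--
--     def get_score(w):
--         res = 0
--         for c in w:
--             res += score[ord(c) - ord('a')] # get number where letter is
--         return res
--
--     lettercount = Counter(letters) # counts occurences of each letter and converts to hashmap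
--     def backtrack(i):
--         if i == len(words):
--             return 0
--         res = backtrack(i+1)# either skip the word
--         if formable_word(words[i], lettercount):# or include it (when possible)
--             for c in words[i]:
--                 lettercount[c] -= 1
--             res = max(res, get_score(words[i]) + backtrack(i + 1))
--             for c in words[i]:
--                 lettercount[c] += 1
--         return res
--     return backtrack(0)
-- ===== SOURCE B (Python) =====
-- from collections import Counter
--
-- def maxScoreWords(words, letters, score):
--     # Iterative power-set enumeration: build every subset with a fold, then
--     # check each subset independently against a fresh combined letter count.
--     avail = Counter(letters)
--     subsets = [[]]
--     for w in words:
--         subsets = subsets + [s + [w] for s in subsets]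
--     best = 0
--     for s in subsets:
--         need = Counter("".join(s))
--         if all(need[c] <= avail[c] for c in need):
--             best = max(best, sum(score[ord(c) - ord('a')] for w in s for c in w))
--     return best
-- ===== Notes on version B (the rewrite author's own statement) =====
-- stated objective: alternative
-- what changed: Replaces the recursive backtracking that mutates and restores a shared letter counter with a flat iterative power-set enumeration: a fold builds the list of all word subsets, then each subset is checked independently against a fresh combined Counter and scored only if feasible.
import Mathlib
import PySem

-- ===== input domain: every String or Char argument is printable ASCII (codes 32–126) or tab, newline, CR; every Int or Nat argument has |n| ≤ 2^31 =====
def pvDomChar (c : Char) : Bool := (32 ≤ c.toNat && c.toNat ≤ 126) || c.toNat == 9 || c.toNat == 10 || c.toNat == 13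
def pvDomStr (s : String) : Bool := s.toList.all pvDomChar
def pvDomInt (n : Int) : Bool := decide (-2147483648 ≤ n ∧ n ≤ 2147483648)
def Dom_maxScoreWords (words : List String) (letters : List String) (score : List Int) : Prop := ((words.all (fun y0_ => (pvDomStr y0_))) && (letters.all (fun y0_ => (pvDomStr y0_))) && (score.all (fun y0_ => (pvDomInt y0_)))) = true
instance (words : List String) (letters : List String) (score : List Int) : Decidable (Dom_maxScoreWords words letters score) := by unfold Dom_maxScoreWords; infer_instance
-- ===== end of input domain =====

-- B replaces A's recursive backtracking over a mutated-and-restored shared letter counter by a flat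
-- iterative power-set enumeration with a fresh per-subset feasibility check (objective: alternative).


-- ===== PORT A =====
-- A Python character is a length-1 string (Counter(letters) has string keys, Counter(w) char keys).
def pvChar (c : Char) : String := String.ofList [c]

-- formable_word(w, lettercount): loop over Counter(w)'s keys with early 'return False' = List.all
def pvFormable (w : String) (lc : PySem.Dict String Int) : Bool :=
  let wc := PySem.Dict.counter w.toList
  wc.keys.all (fun c => !(decide (wc.getD c 0 > lc.getD (pvChar c) 0)))

-- get_score(w): score[ord(c) - ord('a')]; Pre_ guarantees the index is in Python range for every
-- word that ever gets scored, so the total form pyGetD is exact here.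
def pvGetScore (score : List Int) (w : String) : Int :=
  w.toList.foldl (fun r c => r + PySem.List.pyGetD score ((c.toNat : Int) - 97) 0) 0

-- 'for c in words[i]: lettercount[c] -= 1' (Counter missing key reads as 0 = modify with default 0)
def pvDec (w : String) (lc : PySem.Dict String Int) : PySem.Dict String Int :=
  w.toList.foldl (fun d c => d.modify (pvChar c) 0 (fun v => v - 1)) lc

-- backtrack(i); the Python restores lettercount after the include branch, so the functional port
-- simply reuses the unchanged dictionary lc for everything after that branch.
def pvBacktrack (score : List Int) (ws : List String) (lc : PySem.Dict String Int) : Int :=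
  match ws with
  | [] => 0
  | w :: rest =>
    let res := pvBacktrack score rest lc
    if pvFormable w lc then
      max res (pvGetScore score w + pvBacktrack score rest (pvDec w lc))
    else res

def maxScoreWords (words : List String) (letters : List String) (score : List Int) : Int :=
  pvBacktrack score words (PySem.Dict.counter letters)

-- ===== PORT B =====
-- subsets = [[]]; for w in words: subsets = subsets + [s + [w] for s in subsets]
def pvSubsets (words : List String) : List (List String) :=
  words.foldl (fun acc w => acc ++ acc.map (fun s => s ++ [w])) [[]]

-- sum(score[ord(c) - ord('a')] for w in s for c in w)
def pvSubsetScore (score : List Int) (s : List String) : Int :=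
  s.foldl (fun t w => w.toList.foldl (fun t c => t + PySem.List.pyGetD score ((c.toNat : Int) - 97) 0) t) 0

-- need = Counter("".join(s)); all(need[c] <= avail[c] for c in need)
def pvFeasible (avail : PySem.Dict String Int) (s : List String) : Bool :=
  let need := PySem.Dict.counter (PySem.Str.join "" s).toList
  need.keys.all (fun c => decide (need.getD c 0 ≤ avail.getD (pvChar c) 0))

def maxScoreWords_alt (words : List String) (letters : List String) (score : List Int) : Int :=
  let avail := PySem.Dict.counter letters
  (pvSubsets words).foldl
    (fun best s => if pvFeasible avail s then max best (pvSubsetScore score s) else best) 0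

-- ===== PRECONDITION & SPEC =====
-- Pre_ excludes exactly the inputs where the Python raises IndexError: both programs score a word
-- only when it is formable from Counter(letters), so every character of every formable word must
-- index score within Python list range (negative wraparound included).
def Pre_maxScoreWords (words : List String) (letters : List String) (score : List Int) : Prop :=
  (words.all (fun w =>
      !(w.toList.all (fun c =>
          decide ((w.toList.count c : Int) ≤ (letters.count (pvChar c) : Int))))
      || w.toList.all (fun c =>
          decide (PySem.Raise.InRange score.length ((c.toNat : Int) - 97))))) = true
instance (words : List String) (letters : List String) (score : List Int) : Decidable (Pre_maxScoreWords words letters score) := by unfold Pre_maxScoreWords; infer_instance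

def pvWitness_maxScoreWords : List String × List String × List Int := (["ab", "a"], ["a", "b"], [1, 2])

def Spec_maxScoreWords (words : List String) (letters : List String) (score : List Int) (out : Int) : Prop := out = maxScoreWords_alt words letters score
instance (words : List String) (letters : List String) (score : List Int) (out : Int) : Decidable (Spec_maxScoreWords words letters score out) := by unfold Spec_maxScoreWords; infer_instance

-- ===== CLAIM (what is proved, stated in full; the proofs are below) =====
def Claim_equal_maxScoreWords : Prop := ∀ (words : List String) (letters : List String) (score : List Int), Dom_maxScoreWords words letters score → Pre_maxScoreWords words letters score → Spec_maxScoreWords words letters score (maxScoreWords words letters score)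

-- ===== LEMMAS AND PROOFS =====

-- score of one character / one word / one subset, as sums
def pvIdx (score : List Int) (c : Char) : Int := PySem.List.pyGetD score ((c.toNat : Int) - 97) 0
def pvGsc (score : List Int) (w : String) : Int := (w.toList.map (pvIdx score)).sum
def pvChars (s : List String) : List Char := s.flatMap String.toList
def pvScr (score : List Int) (s : List String) : Int := ((pvChars s).map (pvIdx score)).sum

-- Prop/Bool-level checks against an abstract availability function f : Char → Int
def pvFormP (f : Char → Int) (w : String) : Bool :=
  w.toList.all (fun c => decide ((w.toList.count c : Int) ≤ f c))
def pvFeasP (f : Char → Int) (s : List String) : Bool :=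
  (pvChars s).all (fun c => decide (((pvChars s).count c : Int) ≤ f c))

-- the subsets of ws, recursively (head either skipped or prepended)
def pvSubsR : List String → List (List String)
  | [] => [[]]
  | w :: r => pvSubsR r ++ (pvSubsR r).map (fun s => w :: s)

-- pure version of A's backtracking
def pvBtF (score : List Int) : List String → (Char → Int) → Int
  | [], _ => 0
  | w :: rest, f =>
    let res := pvBtF score rest f
    if pvFormP f w then
      max res (pvGsc score w + pvBtF score rest (fun c => f c - (w.toList.count c : Int)))
    else res

lemma pvChar_inj {a b : Char} (h : pvChar a = pvChar b) : a = b := by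
  have h2 : [a] = [b] := String.ofList_inj.mp (by simpa [pvChar] using h)
  simpa using h2

lemma pvJoin_toList (s : List String) : (PySem.Str.join "" s).toList = pvChars s := by
  have h1 : (PySem.Str.join "" s).toList = PySem.Chars.join [] (s.map String.toList) := by
    simp [PySem.Str.join]
  have h2 : List.intercalate ([] : List Char) (s.map String.toList) = (s.map String.toList).flatten := by
    generalize s.map String.toList = L
    induction L with
    | nil => rfl
    | cons x r ih =>
      cases r with
      | nil => simp [List.intercalate]
      | cons y t => simp_all [List.intercalate, List.intersperse]
  simp only [h1, PySem.Chars.join]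
  simp [h2, pvChars, List.flatMap_def]

lemma pvDec_getD (l : List Char) (lc : PySem.Dict String Int) (x : Char) :
    (l.foldl (fun d c => d.modify (pvChar c) 0 (fun v => v - 1)) lc).getD (pvChar x) 0
      = lc.getD (pvChar x) 0 - l.count x := by
  induction l generalizing lc with
  | nil => simp
  | cons c r ih =>
    simp only [List.foldl_cons, ih, PySem.Dict.getD_modify]
    by_cases hx : pvChar x = pvChar c
    · have : x = c := pvChar_inj hx
      subst this
      simp; omega
    · have hne : c ≠ x := fun e => hx (by rw [e])
      simp [hx, hne]

lemma pvFormable_eq (w : String) (lc : PySem.Dict String Int) :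
    pvFormable w lc = pvFormP (fun c => lc.getD (pvChar c) 0) w := by
  simp only [pvFormable, pvFormP, PySem.Dict.keys_counter, PySem.Dict.getD_counter]
  rw [Bool.eq_iff_iff]
  simp [List.all_eq_true, PySem.Set.mem_ofList]

lemma pvGetScore_eq (score : List Int) (w : String) : pvGetScore score w = pvGsc score w := by
  simpa [pvGetScore, pvGsc, pvIdx] using PySem.List.foldl_add w.toList (pvIdx score) 0

lemma pvSubsetScore_eq (score : List Int) (s : List String) :
    pvSubsetScore score s = pvScr score s := by
  have aux : ∀ (s : List String) (t0 : Int),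
      s.foldl (fun t w => w.toList.foldl (fun t c => t + PySem.List.pyGetD score ((c.toNat : Int) - 97) 0) t) t0
        = t0 + pvScr score s := by
    intro s
    induction s with
    | nil => intro t0; simp [pvScr, pvChars]
    | cons w r ih =>
      intro t0
      simp only [List.foldl_cons, ih]
      have hw := PySem.List.foldl_add w.toList (pvIdx score) t0
      simp only [pvIdx] at hw
      rw [hw]
      simp [pvScr, pvChars]
      ring
  simpa using aux s 0

lemma pvBacktrack_eq (score : List Int) (ws : List String) (lc : PySem.Dict String Int) :
    pvBacktrack score ws lc = pvBtF score ws (fun c => lc.getD (pvChar c) 0) := by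
  induction ws generalizing lc with
  | nil => rfl
  | cons w rest ih =>
    simp only [pvBacktrack, pvBtF, ih, pvFormable_eq, pvGetScore_eq]
    have hd : (fun c => (pvDec w lc).getD (pvChar c) 0)
        = (fun c => lc.getD (pvChar c) 0 - (w.toList.count c : Int)) := by
      funext c; exact pvDec_getD w.toList lc c
    rw [hd]

lemma pvFoldl_if_max (p : List String → Bool) (h : List String → Int) (L : List (List String)) (b : Int) :
    L.foldl (fun best s => if p s then max best (h s) else best) b
      = ((L.filter p).map h).foldl max b := by
  induction L generalizing b with
  | nil => rfl
  | cons s r ih =>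
    by_cases hp : p s <;> simp [hp, ih]

lemma pvFeasP_cons (f : Char → Int) (w : String) (s : List String) :
    pvFeasP f (w :: s)
      = (pvFormP f w && pvFeasP (fun c => f c - (w.toList.count c : Int)) s) := by
  have hch : pvChars (w :: s) = w.toList ++ pvChars s := by simp [pvChars]
  rw [Bool.eq_iff_iff]
  simp only [pvFeasP, pvFormP, hch, Bool.and_eq_true, List.all_eq_true, List.mem_append,
    List.count_append, decide_eq_true_eq]
  constructor
  · intro h
    refine ⟨fun c hc => ?_, fun c hc => ?_⟩
    · have := h c (Or.inl hc)
      have hnn : (0 : Int) ≤ ((pvChars s).count c : Int) := Int.natCast_nonneg _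
      push_cast at this ⊢
      omega
    · have := h c (Or.inr hc)
      push_cast at this ⊢
      omega
  · intro ⟨h1, h2⟩ c hc
    rcases hc with hc | hc
    · by_cases hcs : c ∈ pvChars s
      · have := h2 c hcs
        push_cast at this ⊢; omega
      · have h0 : (pvChars s).count c = 0 := List.count_eq_zero.mpr hcs
        have := h1 c hc
        push_cast [h0] at this ⊢; omega
    · by_cases hcw : c ∈ w.toList
      · have := h2 c hc; push_cast at this ⊢; omega
      · have h0 : w.toList.count c = 0 := List.count_eq_zero.mpr hcw
        have := h2 c hc
        push_cast [h0] at this ⊢; omega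

lemma pvSubsR_head (ws : List String) : ∃ t, pvSubsR ws = [] :: t := by
  induction ws with
  | nil => exact ⟨[], rfl⟩
  | cons w r ih =>
    obtain ⟨t, ht⟩ := ih
    exact ⟨t ++ (pvSubsR r).map (fun s => w :: s), by simp [pvSubsR, ht]⟩

lemma pvFoldl_max_map_add (a z : Int) (M : List Int) :
    (M.map (fun x => a + x)).foldl max (a + z) = a + M.foldl max z := by
  induction M generalizing z with
  | nil => rfl
  | cons x r ih => simp only [List.map_cons, List.foldl_cons, Int.max_add_left, ih]

lemma pvFeasP_nil (f : Char → Int) : pvFeasP f [] = true := by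
  simp [pvFeasP, pvChars]

lemma pvScr_cons (score : List Int) (w : String) (s : List String) :
    pvScr score (w :: s) = pvGsc score w + pvScr score s := by
  simp [pvScr, pvChars, pvGsc]

lemma pvBtF_eq (score : List Int) (ws : List String) (f : Char → Int) :
    pvBtF score ws f = (((pvSubsR ws).filter (pvFeasP f)).map (pvScr score)).foldl max 0 := by
  induction ws generalizing f with
  | nil =>
    simp [pvBtF, pvSubsR, pvFeasP_nil, pvScr, pvChars]
  | cons w r ih =>
    have hcomp : (pvFeasP f ∘ fun s => w :: s)
        = fun s => pvFormP f w && pvFeasP (fun c => f c - (w.toList.count c : Int)) s := by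
      funext s; exact pvFeasP_cons f w s
    simp only [pvBtF, pvSubsR, List.filter_append, List.map_append, List.foldl_append,
      List.filter_map, hcomp]
    by_cases hform : pvFormP f w
    · simp only [hform, Bool.true_and, if_true]
      obtain ⟨t, ht⟩ := pvSubsR_head r
      set f' := fun c => f c - (w.toList.count c : Int) with hf'
      set T := t.filter (pvFeasP f') with hT
      have hfilt : (pvSubsR r).filter (pvFeasP f') = [] :: T := by
        rw [ht, List.filter_cons, pvFeasP_nil]; simp; rw [hT]
      rw [hfilt]
      have hlist : List.map (pvScr score) (List.map (fun s => w :: s) ([] :: T))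
          = (pvGsc score w + 0) :: (T.map (pvScr score)).map (fun x => pvGsc score w + x) := by
        simp only [List.map_cons, List.map_map]
        congr 1
        · simp [pvScr, pvChars, pvGsc]
        · exact List.map_congr_left (fun s _ => by simp [pvScr_cons])
      rw [hlist, ← ih f]
      have hih' : pvBtF score r f' = (T.map (pvScr score)).foldl max 0 := by
        rw [ih f', hfilt]
        simp [pvScr, pvChars]
      rw [List.foldl_cons, List.foldl_assoc, pvFoldl_max_map_add, hih']
    · simp only [hform, Bool.false_and]
      simp [ih]

lemma pvSubsets_perm (ws : List String) : (pvSubsets ws).Perm (pvSubsR ws) := by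
  have grow : ∀ (l : List String) (acc : List (List String)),
      (l.foldl (fun acc w => acc ++ acc.map (fun s => s ++ [w])) acc).Perm
        (acc.flatMap (fun s => (pvSubsR l).map (fun t => s ++ t))) := by
    intro l
    induction l with
    | nil => intro acc; simp [pvSubsR]
    | cons w r ih =>
      intro acc
      simp only [List.foldl_cons]
      refine (ih _).trans ?_
      have h1 : ((acc ++ acc.map (fun s => s ++ [w])).flatMap (fun s => (pvSubsR r).map (fun t => s ++ t)))
          = acc.flatMap (fun s => (pvSubsR r).map (fun t => s ++ t))
            ++ acc.flatMap (fun s => (pvSubsR r).map (fun t => (s ++ [w]) ++ t)) := by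
        rw [List.flatMap_append, List.flatMap_map]
      rw [h1]
      have h2 : (acc.flatMap (fun s => (pvSubsR (w :: r)).map (fun t => s ++ t)))
          = acc.flatMap (fun s => (pvSubsR r).map (fun t => s ++ t)
              ++ (pvSubsR r).map (fun t => (s ++ [w]) ++ t)) := by
        simp only [pvSubsR, List.map_append, List.map_map]
        congr 1
        funext s
        congr 1
        exact List.map_congr_left (fun t _ => by simp)
      rw [h2]
      exact List.flatMap_append_perm acc _ _
  have := grow ws [[]]
  simpa [pvSubsets] using this

lemma pvFeasible_eq (letters : List String) (s : List String) :
    pvFeasible (PySem.Dict.counter letters) s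
      = pvFeasP (fun c => (letters.count (pvChar c) : Int)) s := by
  simp only [pvFeasible, pvFeasP, pvJoin_toList, PySem.Dict.keys_counter, PySem.Dict.getD_counter]
  rw [Bool.eq_iff_iff]
  simp [List.all_eq_true, PySem.Set.mem_ofList]

-- ===== VERDICT (by name: the statement is the Claim_ definition above) =====
theorem maxScoreWords_spec : Claim_equal_maxScoreWords := by
  intro words letters score _ _
  unfold Spec_maxScoreWords maxScoreWords maxScoreWords_alt
  have havail : (fun c => (PySem.Dict.counter letters : PySem.Dict String Int).getD (pvChar c) 0)
      = fun c => (letters.count (pvChar c) : Int) := by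
    funext c; exact PySem.Dict.getD_counter letters (pvChar c)
  rw [pvBacktrack_eq, havail, pvBtF_eq]
  have hstep : (fun (best : Int) (s : List String) =>
        if pvFeasible (PySem.Dict.counter letters) s then max best (pvSubsetScore score s) else best)
      = fun best s => if pvFeasP (fun c => (letters.count (pvChar c) : Int)) s
          then max best (pvScr score s) else best := by
    funext best s
    rw [pvFeasible_eq, pvSubsetScore_eq]
  show _ = (pvSubsets words).foldl _ 0
  rw [hstep, pvFoldl_if_max]
  exact List.Perm.foldl_op_eq
    ((List.Perm.map (pvScr score) (List.Perm.filter _ (pvSubsets_perm words))).symm)
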